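-- pv_equiv track=rewrite | github.com/mfiloramo/Python-Practice | Practice/challenges.py | vowel_censor_mod
-- ===== SOURCE A (Python) =====
-- def vowel_censor_mod(string):
--     """Censors all vowels in a string, and also returns a string of the stripped vowels."""
--     new_string = []
--     stripped_vowels = []
--     for i in string:
--         if i in "AEIOUaeiou":
--             new_string.append("*")
--             stripped_vowels.append(i)
--         else:
--             new_string.append(i)
--     return "".join(new_string), "".join(stripped_vowels)
-- ===== SOURCE B (Python) =====
-- def vowel_censor_mod(string):
--     """Censors all vowels in a string, and also returns a string of the stripped vowels."""
--     pos = [i for i, c in enumerate(string) if c in "AEIOUaeiou"]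
--     bounds = zip([-1] + pos, pos + [len(string)])
--     censored = "*".join([string[a + 1:b] for a, b in bounds])
--     stripped = "".join([string[i] for i in pos])
--     return censored, stripped
-- ===== Notes on version B (the rewrite author's own statement) =====
-- stated objective: alternative
-- what changed: Instead of A's single branching loop appending characters to two accumulators, B first computes the list of vowel positions, then builds the censored string as the asterisk-join of the gap slices between consecutive vowel positions and the stripped string by indexing those positions.
import Mathlib
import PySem

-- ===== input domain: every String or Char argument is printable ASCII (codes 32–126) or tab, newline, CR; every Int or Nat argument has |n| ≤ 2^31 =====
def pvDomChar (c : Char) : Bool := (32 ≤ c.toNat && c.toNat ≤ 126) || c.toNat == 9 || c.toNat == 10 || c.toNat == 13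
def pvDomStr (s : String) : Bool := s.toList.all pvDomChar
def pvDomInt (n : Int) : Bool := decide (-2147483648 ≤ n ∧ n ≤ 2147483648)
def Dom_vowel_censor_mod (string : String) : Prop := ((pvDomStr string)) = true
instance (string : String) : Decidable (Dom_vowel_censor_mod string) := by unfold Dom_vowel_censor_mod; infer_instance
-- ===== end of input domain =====

-- B reimplements the task by first computing the list of vowel positions, then assembling
-- the censored string as the asterisk-join of the gap slices between consecutive vowel positions
-- and the stripped string by indexing the positions (alternative decomposition; not faster).

-- ===== PORT A =====
-- 'i in "AEIOUaeiou"' — Python substring test of the one-char string (exact via PySem.Chars.isIn)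
def pvIsVowel (c : Char) : Bool := PySem.Chars.isIn [c] "AEIOUaeiou".toList

-- the loop: one pass over the string, appending to both accumulators
def pvALoop (cs : List Char) (ns sv : List Char) : List Char × List Char :=
  match cs with
  | [] => (ns, sv)
  | i :: rest =>
      if pvIsVowel i then pvALoop rest (ns ++ ['*']) (sv ++ [i])
      else pvALoop rest (ns ++ [i]) sv

def vowel_censor_mod (string : String) : String × String :=
  let r := pvALoop string.toList [] []
  (String.ofList r.1, String.ofList r.2)

-- ===== PORT B =====
-- pos = [i for i, c in enumerate(string) if c in "AEIOUaeiou"]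
-- bounds = zip([-1] + pos, pos + [len(string)])
-- censored = "*".join([string[a+1:b] for a, b in bounds])   (join ported at the char level)
-- stripped = "".join([string[i] for i in pos])              (i is always in range, so getD's
--                                                            default is never used)
def vowel_censor_mod_alt (string : String) : String × String :=
  let cs := string.toList
  let pos : List Int := ((PySem.List.enumerate cs).filter (fun q => pvIsVowel q.2)).map (fun q => q.1)
  let bounds := ((-1 : Int) :: pos).zip (pos ++ [(cs.length : Int)])
  let censored := List.intercalate ['*'] (bounds.map (fun ab => PySem.List.slice cs (some (ab.1 + 1)) (some ab.2)))
  let stripped := pos.map (fun i => (PySem.List.pyGet? cs i).getD ' ')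
  (String.ofList censored, String.ofList stripped)

-- ===== PRECONDITION & SPEC =====
def Spec_vowel_censor_mod (string : String) (out : String × String) : Prop := out = vowel_censor_mod_alt string
instance (string : String) (out : String × String) : Decidable (Spec_vowel_censor_mod string out) := by unfold Spec_vowel_censor_mod; infer_instance

-- ===== CLAIM (what is proved, stated in full; the proofs are below) =====
def Claim_equal_vowel_censor_mod : Prop := ∀ (string : String), Dom_vowel_censor_mod string → Spec_vowel_censor_mod string (vowel_censor_mod string)

-- ===== LEMMAS AND PROOFS =====

-- Nat-level model of B's bounds and gap slices
def pvPairs (P : List Nat) (n : Nat) : List (Nat × Nat) :=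
  (0 :: P.map (· + 1)).zip (P ++ [n])

def pvGapsN (cs : List Char) : List (List Char) :=
  (pvPairs (cs.findIdxs pvIsVowel) cs.length).map (fun se => (cs.drop se.1).take (se.2 - se.1))

-- A-side loop invariant: the loop extends the accumulators by map / filter of the rest
theorem pvALoop_eq (cs ns sv : List Char) :
    pvALoop cs ns sv =
      (ns ++ cs.map (fun c => if pvIsVowel c then '*' else c), sv ++ cs.filter pvIsVowel) := by
  induction cs generalizing ns sv with
  | nil => simp [pvALoop]
  | cons i rest ih =>
      by_cases h : pvIsVowel i <;> simp [pvALoop, h, ih]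

-- enumerate-filter-map computes the (cast) vowel indices
theorem pvPos_eq (cs : List Char) (s : Nat) :
    ((PySem.List.enumerate cs (s : Int)).filter (fun q => pvIsVowel q.2)).map (fun q => q.1)
      = (cs.findIdxs pvIsVowel s).map (fun (n : Nat) => (n : Int)) := by
  induction cs generalizing s with
  | nil => simp [PySem.List.enumerate_nil]
  | cons a t ih =>
      rw [PySem.List.enumerate_cons, List.findIdxs_cons, List.filter_cons]
      have ih' := ih (s + 1)
      push_cast at ih'
      cases h : pvIsVowel a <;> simp [ih']

-- stripped: indexing the vowel positions yields the filter
theorem pvStripped_eq (cs : List Char) :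
    (cs.findIdxs pvIsVowel).map (fun n => (cs[n]?).getD ' ') = cs.filter pvIsVowel := by
  induction cs with
  | nil => simp
  | cons a t ih =>
      rw [List.findIdxs_cons]
      by_cases h : pvIsVowel a <;>
        simp [h, List.findIdxs_start (s := 1), List.map_map, Function.comp_def, ih]

-- the shift step shared by the two gap lemmas
theorem pvShift (a : Char) (t : List Char) (L : List (Nat × Nat)) :
    (L.map (Prod.map (· + 1) (· + 1))).map
        (fun se : Nat × Nat => ((a :: t).drop se.1).take (se.2 - se.1))
      = L.map (fun se : Nat × Nat => (t.drop se.1).take (se.2 - se.1)) := by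
  rw [List.map_map]
  refine List.map_congr_left (fun se _ => ?_)
  have : se.2 + 1 - (se.1 + 1) = se.2 - se.1 := by omega
  simp [Prod.map, this]

theorem pvGapsN_ne_nil (cs : List Char) : pvGapsN cs ≠ [] := by
  have : (pvGapsN cs).length = cs.countP pvIsVowel + 1 := by
    simp [pvGapsN, pvPairs, List.length_zip]
  intro h
  rw [h] at this
  simp at this

-- zipping and mapping after a uniform +1 shift of both bound lists drops the new head char
theorem pvZipShiftMap (a : Char) (t : List Char) (L M : List Nat) :
    (((L.map (· + 1)).zip (M.map (· + 1))).map
        (fun se : Nat × Nat => ((a :: t).drop se.1).take (se.2 - se.1)))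
      = (L.zip M).map (fun se : Nat × Nat => (t.drop se.1).take (se.2 - se.1)) := by
  rw [List.zip_map, pvShift]

theorem pvGapsN_cons_vowel (a : Char) (t : List Char) (h : pvIsVowel a = true) :
    pvGapsN (a :: t) = [] :: pvGapsN t := by
  unfold pvGapsN pvPairs
  rw [List.findIdxs_cons]
  simp only [h, if_true, List.findIdxs_start (s := 1), List.length_cons]
  have h2 : (t.findIdxs pvIsVowel).map (· + 1) ++ [t.length + 1]
      = ((t.findIdxs pvIsVowel) ++ [t.length]).map (· + 1) := by simp
  have h3 : ((0 + 1) :: ((t.findIdxs pvIsVowel).map (· + 1)).map (· + 1))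
      = ((0 :: (t.findIdxs pvIsVowel).map (· + 1)).map (· + 1)) := by simp
  rw [List.map_cons, List.cons_append, List.zip_cons_cons, List.map_cons, h2, h3, pvZipShiftMap]
  simp

theorem pvGapsN_cons_not_vowel (a : Char) (t : List Char) (hd : List Char)
    (r : List (List Char)) (h : pvIsVowel a = false)
    (hs : pvGapsN t = hd :: r) :
    pvGapsN (a :: t) = (a :: hd) :: r := by
  unfold pvGapsN pvPairs at hs ⊢
  rw [List.findIdxs_cons]
  simp only [h, Bool.false_eq_true, if_false, List.findIdxs_start (s := 1), List.length_cons]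
  cases hq : t.findIdxs pvIsVowel with
  | nil =>
      rw [hq] at hs
      simp only [List.map_nil, List.nil_append, List.zip_cons_cons, List.zip_nil_right,
        List.map_cons, List.map_nil, List.drop_zero, Nat.sub_zero] at hs ⊢
      rw [List.cons.injEq] at hs
      obtain ⟨h1, h2⟩ := hs
      rw [← h1, ← h2]
      simp [List.take_succ_cons]
  | cons q qs =>
      rw [hq] at hs
      rw [List.map_cons, List.cons_append, List.zip_cons_cons, List.map_cons] at hs
      rw [List.cons.injEq] at hs
      obtain ⟨h1, h2⟩ := hs
      have h4 : ((q + 1 + 1) :: (qs.map (· + 1)).map (· + 1))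
          = (((q + 1) :: qs.map (· + 1)).map (· + 1)) := by simp
      have h5 : (qs.map (· + 1) ++ [t.length + 1]) = ((qs ++ [t.length]).map (· + 1)) := by simp
      simp only [List.map_cons, List.cons_append]
      rw [List.zip_cons_cons, List.map_cons, h4, h5, pvZipShiftMap, h2]
      rw [← h1]
      simp [List.take_succ_cons]

-- intercalate facts
theorem pvIntercalate_cons_cons (sep x y : List Char) (l : List (List Char)) :
    List.intercalate sep (x :: y :: l) = x ++ sep ++ List.intercalate sep (y :: l) := by
  simp [List.intercalate, List.intersperse]

-- the main B-side lemma: the asterisk-join of the gap slices is A's censoring map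
theorem pvJoin_gaps (cs : List Char) :
    List.intercalate ['*'] (pvGapsN cs) = cs.map (fun c => if pvIsVowel c then '*' else c) := by
  induction cs with
  | nil => simp [pvGapsN, pvPairs, List.intercalate]
  | cons a t ih =>
      obtain ⟨hd, r, hs⟩ := List.exists_cons_of_ne_nil (pvGapsN_ne_nil t)
      by_cases h : pvIsVowel a
      · rw [pvGapsN_cons_vowel a t h, hs, pvIntercalate_cons_cons, ← hs, ih]
        simp [h]
      · rw [pvGapsN_cons_not_vowel a t hd r (by simp [h]) hs]
        have : List.intercalate ['*'] ((a :: hd) :: r) = a :: List.intercalate ['*'] (hd :: r) := by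
          cases r with
          | nil => simp [List.intercalate]
          | cons y l => rw [pvIntercalate_cons_cons, pvIntercalate_cons_cons]; simp
        rw [this, ← hs, ih]
        simp [h]

-- bridge: B's Int-indexed bounds-and-slices equal the Nat-level gaps
theorem pvBounds_eq (cs : List Char) :
    ((((-1 : Int) :: ((cs.findIdxs pvIsVowel).map (fun (n : Nat) => (n : Int)))).zip
        (((cs.findIdxs pvIsVowel).map (fun (n : Nat) => (n : Int))) ++ [(cs.length : Int)])).map
      (fun ab => PySem.List.slice cs (some (ab.1 + 1)) (some ab.2))) = pvGapsN cs := by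
  unfold pvGapsN pvPairs
  have e1 : ∀ (A B : List Int),
      (A.zip B).map (fun ab => PySem.List.slice cs (some (ab.1 + 1)) (some ab.2))
        = ((A.map (· + 1)).zip B).map (fun ab => PySem.List.slice cs (some ab.1) (some ab.2)) := by
    intro A B
    rw [List.zip_map_left, List.map_map]
    rfl
  rw [e1]
  have e2 : (((-1 : Int) :: (cs.findIdxs pvIsVowel).map (fun (n : Nat) => (n : Int))).map (· + 1))
      = ((0 :: (cs.findIdxs pvIsVowel).map (· + 1)).map (fun (n : Nat) => (n : Int))) := by
    simp only [List.map_cons, List.map_map, Function.comp_def]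
    norm_num
  have e3 : ((cs.findIdxs pvIsVowel).map (fun (n : Nat) => (n : Int)) ++ [(cs.length : Int)])
      = (((cs.findIdxs pvIsVowel) ++ [cs.length]).map (fun (n : Nat) => (n : Int))) := by simp
  rw [e2, e3, List.zip_map, List.map_map]
  refine List.map_congr_left (fun se _ => ?_)
  simp [Prod.map, PySem.List.slice_natCast]

-- ===== VERDICT (by name: the statement is the Claim_ definition above) =====
theorem vowel_censor_mod_spec : Claim_equal_vowel_censor_mod := by
  intro s _
  unfold Spec_vowel_censor_mod vowel_censor_mod vowel_censor_mod_alt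
  rw [pvALoop_eq]
  simp only [List.nil_append]
  have hpos : ((PySem.List.enumerate s.toList).filter (fun q => pvIsVowel q.2)).map (fun q => q.1)
      = (s.toList.findIdxs pvIsVowel).map (fun (n : Nat) => (n : Int)) := by
    simpa using pvPos_eq s.toList 0
  rw [hpos, pvBounds_eq, pvJoin_gaps]
  congr 1
  rw [List.map_map]
  have hf : ((fun i => (PySem.List.pyGet? s.toList i).getD ' ') ∘ (fun (n : Nat) => (n : Int))) =
      (fun n : Nat => ((s.toList[n]?).getD ' ')) := by
    funext n
    simp [PySem.List.pyGet?_natCast]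
  rw [hf, pvStripped_eq]
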